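-- pv_equiv track=rewrite | github.com/rkdalsdn94/algoalgo | programmers/Lv2/이모티콘_할인행사.py | solution
-- ===== SOURCE A (Python) =====
-- from itertools import product
--
-- def solution(users, emoticons):
--     answer = [0, 0]  # [플러스 서비스 가입자 수, 이모티콘 총 매출액]
--     discount_rate = [10, 20, 30, 40]  # 가능한 할인율 목록
--
--     # 가능한 모든 할인율 조합에 대해 완전탐색
--     for discount in product(discount_rate, repeat=len(emoticons)):
--         total_pay, plus_num = 0, 0  # 현재 조합의 총 매출액과 플러스 가입자 수
--
--         # 각 사용자별로 구매 행동 시뮬레이션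
--         for rate, price in users:
--             pay = 0  # 현재 사용자의 이모티콘 구매 비용
--             # 각 이모티콘에 대해 할인율 조건을 만족하면 구매
--             for i, emoticon in enumerate(emoticons):
--                 if discount[i] >= rate:  # 사용자의 기준 할인율 이상인 경우 구매
--                     pay += emoticon * (100 - discount[i]) // 100  # 할인된 가격으로 구매
--
--             # 구매 비용이 기준 가격 이상이면 플러스 서비스 가입
--             if pay >= price:
--                 plus_num += 1
--             else:
--                 total_pay += pay  # 그렇지 않으면 이모티콘 구매 비용 추가
--
--         # 결과 업데이트 (우선순위: 1. 플러스 가입자 수, 2. 총 매출액)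
--         if plus_num > answer[0]:
--             answer[0], answer[1] = plus_num, total_pay
--         elif plus_num == answer[0] and total_pay > answer[1]:
--             answer[1] = total_pay
--
--     return answer
-- ===== SOURCE B (Python) =====
-- def solution(users, emoticons):
--     # DFS over emoticons, carrying each user's accumulated pay so the shared
--     # prefix of a discount assignment is computed once instead of per leaf.
--     best = [0, 0]
--
--     def go(rest, pays):
--         nonlocal best
--         if not rest:
--             plus, total = 0, 0
--             for (rate, price), pay in zip(users, pays):
--                 if pay >= price:
--                     plus += 1
--                 else:
--                     total += pay
--             if plus > best[0] or (plus == best[0] and total > best[1]):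
--                 best = [plus, total]
--             return
--         e, tail = rest[0], rest[1:]
--         for d in (10, 20, 30, 40):
--             go(tail, [p + (e * (100 - d) // 100) if d >= r else p
--                       for (r, _), p in zip(users, pays)])
--
--     go(list(emoticons), [0] * len(users))
--     return best
-- ===== Notes on version B (the rewrite author's own statement) =====
-- stated objective: alternative
-- what changed: Replaces the itertools.product loop that re-simulates every user against every full discount tuple with a DFS over emoticons that carries each user's accumulated pay, so each shared discount-prefix is computed once instead of once per leaf.
import Mathlib
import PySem

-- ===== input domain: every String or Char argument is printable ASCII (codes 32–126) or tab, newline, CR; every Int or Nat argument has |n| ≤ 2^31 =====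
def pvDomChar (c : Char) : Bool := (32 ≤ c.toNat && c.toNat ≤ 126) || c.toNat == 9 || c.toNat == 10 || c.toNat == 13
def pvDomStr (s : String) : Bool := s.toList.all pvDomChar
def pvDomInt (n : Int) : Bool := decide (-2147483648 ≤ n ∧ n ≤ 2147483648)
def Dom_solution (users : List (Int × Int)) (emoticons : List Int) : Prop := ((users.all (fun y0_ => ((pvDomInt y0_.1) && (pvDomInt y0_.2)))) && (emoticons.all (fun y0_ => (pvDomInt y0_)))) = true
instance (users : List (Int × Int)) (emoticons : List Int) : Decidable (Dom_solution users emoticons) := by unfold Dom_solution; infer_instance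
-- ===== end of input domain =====

-- B replaces A's itertools.product enumeration with a DFS over emoticons that carries
-- each user's accumulated pay, sharing work across discount prefixes (objective: alternative).

-- ===== PORT A =====
-- itertools.product([10,20,30,40], repeat=n), in Python's order (first coordinate slowest)
def prodRep : Nat → List (List Int)
  | 0 => [[]]
  | n + 1 => ([10, 20, 30, 40] : List Int).flatMap (fun d => (prodRep n).map (fun rest => d :: rest))

-- inner `for i, emoticon in enumerate(emoticons)` loop; discount[i] read via zip,
-- exact since i ranges over emoticons' indices and len(discount) = len(emoticons)
def payForA (discount : List Int) (rate : Int) (emoticons : List Int) : Int :=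
  (List.zip emoticons discount).foldl
    (fun pay ed => if ed.2 ≥ rate then pay + PySem.Int.floordiv (ed.1 * (100 - ed.2)) 100 else pay) 0

-- `for rate, price in users`, state = (total_pay, plus_num)
def simulateA (users : List (Int × Int)) (emoticons : List Int) (discount : List Int) : Int × Int :=
  users.foldl
    (fun s u =>
      let pay := payForA discount u.1 emoticons
      if pay ≥ u.2 then (s.1, s.2 + 1) else (s.1 + pay, s.2)) (0, 0)

-- the `if plus_num > answer[0] … elif …` update; ans = (answer[0], answer[1])
def updateA (ans : Int × Int) (pn tp : Int) : Int × Int :=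
  if pn > ans.1 then (pn, tp)
  else if pn = ans.1 ∧ tp > ans.2 then (ans.1, tp)
  else ans

def solution (users : List (Int × Int)) (emoticons : List Int) : List Int :=
  let answer :=
    (prodRep emoticons.length).foldl
      (fun ans discount =>
        let r := simulateA users emoticons discount
        updateA ans r.2 r.1) (0, 0)
  [answer.1, answer.2]

-- ===== PORT B =====
-- one DFS step: add emoticon e at rate d to every user's running pay
def addPay (users : List (Int × Int)) (pays : List Int) (e d : Int) : List Int :=
  (List.zip users pays).map
    (fun up => if d ≥ up.1.1 then up.2 + PySem.Int.floordiv (e * (100 - d)) 100 else up.2)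

-- leaf: (plus, total) from the finished pays
def evalPays (users : List (Int × Int)) (pays : List Int) : Int × Int :=
  (List.zip users pays).foldl
    (fun s up => if up.2 ≥ up.1.2 then (s.1 + 1, s.2) else (s.1, s.2 + up.2)) (0, 0)

def bestUpd (best cand : Int × Int) : Int × Int :=
  if cand.1 > best.1 ∨ (cand.1 = best.1 ∧ cand.2 > best.2) then cand else best

def goB (users : List (Int × Int)) : List Int → List Int → Int × Int → Int × Int
  | [], pays, best => bestUpd best (evalPays users pays)
  | e :: tail, pays, best =>
      ([10, 20, 30, 40] : List Int).foldl (fun b d => goB users tail (addPay users pays e d) b) best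

def solution_alt (users : List (Int × Int)) (emoticons : List Int) : List Int :=
  let b := goB users emoticons (users.map (fun _ => 0)) (0, 0)
  [b.1, b.2]

-- ===== PRECONDITION & SPEC =====
def Spec_solution (users : List (Int × Int)) (emoticons : List Int) (out : List Int) : Prop := out = solution_alt users emoticons
instance (users : List (Int × Int)) (emoticons : List Int) (out : List Int) : Decidable (Spec_solution users emoticons out) := by unfold Spec_solution; infer_instance

-- ===== CLAIM (what is proved, stated in full; the proofs are below) =====
def Claim_equal_solution : Prop := ∀ (users : List (Int × Int)) (emoticons : List Int), Dom_solution users emoticons → Spec_solution users emoticons (solution users emoticons)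

-- ===== LEMMAS AND PROOFS =====
-- pays after applying the whole discount assignment ds (proof-only bridge between the two ports)
def finalPays (users : List (Int × Int)) : List Int → List Int → List Int → List Int
  | [], _, pays => pays
  | _ :: _, [], pays => pays
  | e :: es, d :: ds, pays => finalPays users es ds (addPay users pays e d)

theorem payForA_eq_sum (ds : List Int) (rate : Int) (es : List Int) :
    payForA ds rate es =
      ((List.zip es ds).map
        (fun ed => if ed.2 ≥ rate then PySem.Int.floordiv (ed.1 * (100 - ed.2)) 100 else 0)).sum := by
  unfold payForA
  rw [List.foldl_ext _ (fun pay ed =>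
      pay + if ed.2 ≥ rate then PySem.Int.floordiv (ed.1 * (100 - ed.2)) 100 else (0:Int)) 0
      (by intro acc x _; by_cases hx : x.2 ≥ rate <;> simp [hx])]
  rw [PySem.List.foldl_add]
  simp

theorem payForA_cons (d : Int) (ds : List Int) (rate e : Int) (es : List Int) :
    payForA (d :: ds) rate (e :: es) =
      (if d ≥ rate then PySem.Int.floordiv (e * (100 - d)) 100 else 0) + payForA ds rate es := by
  simp [payForA_eq_sum]

theorem zip_map_snd {α β : Type} (users : List α) (pays : List β) (f : α × β → β)
    (h : pays.length = users.length) :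
    List.zip users ((List.zip users pays).map f) =
      (List.zip users pays).map (fun x => (x.1, f x)) := by
  induction users generalizing pays with
  | nil => simp
  | cons u us ih =>
    cases pays with
    | nil => simp at h
    | cons p ps =>
      simp only [List.zip_cons_cons, List.map_cons]
      rw [ih ps (by simpa using h)]

theorem length_addPay (users : List (Int × Int)) (pays : List Int) (e d : Int)
    (h : pays.length = users.length) : (addPay users pays e d).length = users.length := by
  simp [addPay, h]

theorem finalPays_zip (users : List (Int × Int)) (es : List Int) :
    ∀ (ds pays : List Int), pays.length = users.length →
    List.zip users (finalPays users es ds pays) =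
      (List.zip users pays).map (fun up => (up.1, up.2 + payForA ds up.1.1 es)) := by
  induction es with
  | nil =>
    intro ds pays h
    simp [finalPays, payForA_eq_sum]
  | cons e es ih =>
    intro ds pays h
    cases ds with
    | nil => simp [finalPays, payForA_eq_sum]
    | cons d ds =>
      rw [finalPays, ih ds _ (length_addPay users pays e d h)]
      unfold addPay
      rw [zip_map_snd users pays _ h, List.map_map]
      apply List.map_congr_left
      intro x _
      simp only [Function.comp_apply, payForA_cons]
      split_ifs <;> simp [add_assoc]

theorem swap_fold (payF : (Int × Int) → Int) (l : List (Int × Int)) :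
    ∀ (a b : Int),
      l.foldl (fun s u => if payF u ≥ u.2 then (s.1 + 1, s.2) else (s.1, s.2 + payF u)) (a, b) =
        ((l.foldl (fun s u => if payF u ≥ u.2 then (s.1, s.2 + 1) else (s.1 + payF u, s.2)) (b, a)).2,
         (l.foldl (fun s u => if payF u ≥ u.2 then (s.1, s.2 + 1) else (s.1 + payF u, s.2)) (b, a)).1) := by
  induction l with
  | nil => intro a b; simp
  | cons u us ih =>
    intro a b
    simp only [List.foldl_cons]
    split_ifs <;> exact ih _ _

theorem simulate_eval (users : List (Int × Int)) (emoticons ds : List Int) :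
    evalPays users (finalPays users emoticons ds (users.map (fun _ => 0))) =
      ((simulateA users emoticons ds).2, (simulateA users emoticons ds).1) := by
  unfold evalPays simulateA
  rw [finalPays_zip users emoticons ds _ (by simp)]
  have hz : List.zip users (users.map (fun _ => (0:Int))) = users.map (fun u => (u, (0:Int))) := by
    induction users with
    | nil => simp
    | cons u us ihz => simp only [List.map_cons, List.zip_cons_cons, ihz]
  rw [hz, List.map_map, List.foldl_map]
  simpa using swap_fold (fun u => payForA ds u.1 emoticons) users 0 0

theorem goB_foldl (users : List (Int × Int)) (es : List Int) :
    ∀ (pays : List Int) (best : Int × Int),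
      goB users es pays best =
        (prodRep es.length).foldl
          (fun b ds => bestUpd b (evalPays users (finalPays users es ds pays))) best := by
  induction es with
  | nil => intro pays best; simp [goB, prodRep, finalPays]
  | cons e tail ih =>
    intro pays best
    simp only [goB, List.length_cons, prodRep, List.foldl_flatMap, List.foldl_map]
    refine List.foldl_ext _ _ best (fun acc d _ => ?_)
    rw [ih]
    rfl

theorem updateA_eq_bestUpd (ans : Int × Int) (pn tp : Int) :
    updateA ans pn tp = bestUpd ans (pn, tp) := by
  unfold updateA bestUpd
  split_ifs with h1 h2 h3 <;> simp_all
  omega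

-- ===== VERDICT (by name: the statement is the Claim_ definition above) =====
theorem solution_spec : Claim_equal_solution := by
  intro users emoticons _
  unfold Spec_solution solution solution_alt
  rw [goB_foldl]
  refine congrArg (fun p : Int × Int => [p.1, p.2]) ?_
  refine List.foldl_ext _ _ (0, 0) (fun acc ds _ => ?_)
  rw [simulate_eval, updateA_eq_bestUpd]
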